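-- pv_equiv track=rewrite | github.com/Midox04/TIPE | Méthode Yani /DOBBLE.py | listekparmin
-- ===== SOURCE A (Python) =====
-- def rajoute(i,l,LL):
--     L = []
--     for j in l:
--         a = [i]+j
--         list.sort(a)
--         if a not in LL:
--             L.append(a)
--     return L
--
-- def listekparmin(k,n,l):
--     L = []
--     if k==1:
--         for i in range(n):
--             if i+1 not in l:
--                 L.append([i+1])
--     else:
--         for i in range(n):
--             if i+1 not in l:
--                 LL = rajoute(i+1,listekparmin(k-1,n,l+[i+1]),L)
--                 L = L+LL
--     return L
-- ===== SOURCE B (Python) =====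
-- def listekparmin(k, n, l):
--     # Direct lexicographic enumeration of k-combinations of {1..n} \ l:
--     # filter the allowed values once, then for each choice of a first position
--     # recurse on the later positions; no duplicates generated, no sorting, no
--     # membership scans over the output.
--     if k < 1:
--         return []
--     forbidden = set(l)
--     avail = [x for x in range(1, n + 1) if x not in forbidden]
--
--     def combos(start, m):
--         if m == 0:
--             return [[]]
--         res = []
--         for i in range(start, len(avail) - m + 1):
--             for t in combos(i + 1, m - 1):
--                 res.append([avail[i]] + t)
--         return res
--
--     return combos(0, k)
-- ===== Notes on version B (the rewrite author's own statement) =====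
-- stated objective: alternative
-- what changed: A rebuilds each combination from recursive calls over a growing exclusion list, sorts every candidate and scans the whole output list to drop duplicates; B filters the allowed values once and enumerates the k-combinations directly in lexicographic order by recursion over positions, generating each combination exactly once with no sorting and no membership scans.
import Mathlib
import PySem

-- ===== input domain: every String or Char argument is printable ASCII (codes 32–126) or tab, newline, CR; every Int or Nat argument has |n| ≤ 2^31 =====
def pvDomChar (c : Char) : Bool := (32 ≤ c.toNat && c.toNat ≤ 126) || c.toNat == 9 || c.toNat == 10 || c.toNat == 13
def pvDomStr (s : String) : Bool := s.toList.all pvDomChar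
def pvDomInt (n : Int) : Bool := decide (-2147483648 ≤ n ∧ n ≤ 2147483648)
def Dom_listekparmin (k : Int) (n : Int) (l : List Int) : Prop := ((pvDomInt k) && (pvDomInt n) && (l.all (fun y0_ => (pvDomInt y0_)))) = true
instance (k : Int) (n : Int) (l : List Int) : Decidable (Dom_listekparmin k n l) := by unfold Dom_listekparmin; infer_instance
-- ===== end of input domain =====

-- B replaces A's duplicate-generating recursion (sort + scan of the output for every candidate)
-- by a direct lexicographic enumeration of the k-combinations of the allowed values.

-- ===== PORT A =====
def pvRajoute (i : Int) (lst : List (List Int)) (LL : List (List Int)) : List (List Int) :=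
  lst.foldl (fun L j =>
    let a := PySem.List.sorted (i :: j) (fun x => x) false
    if a ∈ LL then L else L ++ [a]) []

-- termination measure for the port of A (cited by its decreasing_by)
def pvAvailCount (n : Int) (l : List Int) : Nat :=
  ((PySem.List.pyRange 0 n 1).filter (fun i => !(decide ((i + 1) ∈ l)))).length

lemma pvAvailCount_dec (n : Int) (l : List Int) (i : Int)
    (hi : i ∈ PySem.List.pyRange 0 n 1) (hni : (i + 1) ∉ l) :
    pvAvailCount n (l ++ [i + 1]) < pvAvailCount n l := by
  unfold pvAvailCount
  have hcong : (PySem.List.pyRange 0 n 1).filter (fun j => !(decide ((j + 1) ∈ l ++ [i + 1])))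
      = ((PySem.List.pyRange 0 n 1).filter (fun j => !(decide ((j + 1) ∈ l)))).filter
          (fun j => !(decide (j = i))) := by
    rw [List.filter_filter]
    apply List.filter_congr
    intro j _
    simp only [List.mem_append, List.mem_singleton]
    by_cases h1 : (j + 1) ∈ l <;> by_cases h2 : j = i <;> simp [h1, h2]
  rw [hcong]
  have hmem : i ∈ (PySem.List.pyRange 0 n 1).filter (fun j => !(decide ((j + 1) ∈ l))) := by
    simp [List.mem_filter, hi, hni]
  exact List.length_filter_lt_length_iff_exists.mpr ⟨i, hmem, by simp⟩

def listekparmin (k : Int) (n : Int) (l : List Int) : List (List Int) :=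
  if k == 1 then
    (PySem.List.pyRange 0 n 1).foldl
      (fun L i => if (i + 1) ∈ l then L else L ++ [[i + 1]]) []
  else
    (PySem.List.pyRange 0 n 1).attach.foldl
      (fun L x =>
        if h : (x.1 + 1) ∈ l then L
        else L ++ pvRajoute (x.1 + 1) (listekparmin (k - 1) n (l ++ [x.1 + 1])) L) []
  termination_by pvAvailCount n l
  decreasing_by exact pvAvailCount_dec n l x.1 x.2 h

-- ===== PORT B =====
def pvCombosF (avail : List Int) : Int → Nat → List (List Int)
  | _, 0 => [[]]
  | start, m + 1 =>
      (PySem.List.pyRange start ((avail.length : Int) - (m : Int)) 1).foldl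
        (fun res i =>
          res ++ (pvCombosF avail (i + 1) m).map (fun t => PySem.List.pyGetD avail i 0 :: t)) []

def listekparmin_alt (k : Int) (n : Int) (l : List Int) : List (List Int) :=
  if k < 1 then []
  else pvCombosF ((PySem.List.pyRange 1 (n + 1) 1).filter (fun x => !(decide (x ∈ l)))) 0 k.toNat

-- ===== PRECONDITION & SPEC =====
def Spec_listekparmin (k : Int) (n : Int) (l : List Int) (out : List (List Int)) : Prop := out = listekparmin_alt k n l
instance (k : Int) (n : Int) (l : List Int) (out : List (List Int)) : Decidable (Spec_listekparmin k n l out) := by unfold Spec_listekparmin; infer_instance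

-- ===== CLAIM (what is proved, stated in full; the proofs are below) =====
def Claim_equal_listekparmin : Prop := ∀ (k : Int) (n : Int) (l : List Int), Dom_listekparmin k n l → Spec_listekparmin k n l (listekparmin k n l)

-- ===== LEMMAS AND PROOFS =====

-- proof-side pick/skip form of the combination enumerator
def pvCombos : List Int → Nat → List (List Int)
  | _, 0 => [[]]
  | [], _ + 1 => []
  | x :: rest, m + 1 =>
      (pvCombos rest m).map (fun t => x :: t) ++ pvCombos rest (m + 1)

lemma pvCombos_zero (xs : List Int) : pvCombos xs 0 = [[]] := by cases xs <;> rfl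

lemma pvCombos_nil_of_short {xs : List Int} {m : Nat} (h : xs.length < m) :
    pvCombos xs m = [] := by
  induction xs generalizing m with
  | nil =>
    cases m with
    | zero => omega
    | succ m => rfl
  | cons x rest ih =>
    cases m with
    | zero => omega
    | succ m =>
      simp only [pvCombos]
      rw [ih (by simpa using h), ih (by simp at h ⊢; omega)]
      rfl

-- the index loop of B, as the pick/skip recursion
lemma pvCombos_succ_flat :
    ∀ (xs : List Int) (m : Nat),
      pvCombos xs (m + 1)
        = (PySem.List.pyRange 0 ((xs.length : Int) - (m : Int)) 1).flatMap
            (fun i => (pvCombos (xs.drop (i.toNat + 1)) m).map (fun t => PySem.List.pyGetD xs i 0 :: t)) := by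
  intro xs
  induction xs with
  | nil =>
    intro m
    rw [PySem.List.pyRange_one_eq_nil (by simp)]
    cases m <;> rfl
  | cons x rest ih =>
    intro m
    by_cases hb : ((x :: rest).length : Int) - (m : Int) ≤ 0
    · rw [PySem.List.pyRange_one_eq_nil hb]
      simp only [pvCombos, List.flatMap_nil]
      rw [pvCombos_nil_of_short (by simp at hb ⊢; omega),
        pvCombos_nil_of_short (by simp at hb ⊢; omega)]
      rfl
    · rw [PySem.List.pyRange_one_cons (by omega), List.flatMap_cons]
      simp only [pvCombos]
      congr 1
      · have h0 : ((0 : Int).toNat + 1) = 1 := rfl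
        simp only [h0, PySem.List.pyGetD_zero_cons, List.drop_one, List.tail_cons]
      · have h01 : (0 : Int) + 1 = 1 := by norm_num
        rw [h01, ih m]
        have hsh : PySem.List.pyRange 1 (((x :: rest).length : Int) - (m : Int)) 1
            = (PySem.List.pyRange 0 ((rest.length : Int) - (m : Int)) 1).map (fun j => 1 + j) := by
          rw [PySem.List.pyRange_one 1, PySem.List.pyRange_one 0, List.map_map]
          have he : (((x :: rest).length : Int) - (m : Int) - 1).toNat
              = ((rest.length : Int) - (m : Int) - 0).toNat := by simp; omega
          rw [he]
          apply List.map_congr_left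
          intro j _
          simp only [Function.comp]
          omega
        rw [hsh, List.flatMap_map]
        apply List.flatMap_congr
        intro j hj
        have hj0 : 0 ≤ j := by
          have := (PySem.List.mem_pyRange_one.mp hj).1
          omega
        have ht1 : (1 + j).toNat + 1 = j.toNat + 1 + 1 := by omega
        rw [ht1, List.drop_succ_cons]
        have hget : PySem.List.pyGetD (x :: rest) (1 + j) 0 = PySem.List.pyGetD rest j 0 := by
          have hc1 : (1 + j) = ((j.toNat + 1 : Nat) : Int) := by omega
          have hc2 : j = ((j.toNat : Nat) : Int) := by omega
          rw [hc1, hc2, PySem.List.pyGetD_natCast, PySem.List.pyGetD_natCast]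
          rfl
        rw [hget]

-- B's index recursion computes the pick/skip recursion on the dropped suffix
lemma pvCombosF_eq (avail : List Int) :
    ∀ (m : Nat) (start : Nat),
      pvCombosF avail (start : Int) m = pvCombos (avail.drop start) m := by
  intro m
  induction m with
  | zero => intro start; rw [pvCombos_zero]; rfl
  | succ m ih =>
    intro start
    show (PySem.List.pyRange (start : Int) ((avail.length : Int) - (m : Int)) 1).foldl
        (fun res i =>
          res ++ (pvCombosF avail (i + 1) m).map (fun t => PySem.List.pyGetD avail i 0 :: t)) []
      = _
    rw [PySem.List.foldl_append_eq_flatMap, List.nil_append]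
    have hcongr : (PySem.List.pyRange (start : Int) ((avail.length : Int) - (m : Int)) 1).flatMap
          (fun i => (pvCombosF avail (i + 1) m).map (fun t => PySem.List.pyGetD avail i 0 :: t))
        = (PySem.List.pyRange (start : Int) ((avail.length : Int) - (m : Int)) 1).flatMap
          (fun i => (pvCombos (avail.drop (i.toNat + 1)) m).map (fun t => PySem.List.pyGetD avail i 0 :: t)) := by
      apply List.flatMap_congr
      intro i hi
      have hi0 : 0 ≤ i := by
        have := (PySem.List.mem_pyRange_one.mp hi).1
        omega
      have hc : i + 1 = (((i.toNat + 1 : Nat)) : Int) := by omega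
      rw [hc, ih (i.toNat + 1)]
    rw [hcongr, pvCombos_succ_flat (avail.drop start) m]
    have hsh : PySem.List.pyRange (start : Int) ((avail.length : Int) - (m : Int)) 1
        = (PySem.List.pyRange 0 (((avail.drop start).length : Int) - (m : Int)) 1).map
            (fun j => (start : Int) + j) := by
      rw [PySem.List.pyRange_one (start : Int), PySem.List.pyRange_one 0, List.map_map]
      have he : ((avail.length : Int) - (m : Int) - (start : Int)).toNat
          = (((avail.drop start).length : Int) - (m : Int) - 0).toNat := by
        simp [List.length_drop]; omega
      rw [he]
      apply List.map_congr_left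
      intro j _
      simp only [Function.comp]
      omega
    rw [hsh, List.flatMap_map]
    apply (List.flatMap_congr _).symm
    intro j hj
    have hj0 : 0 ≤ j := by
      have := (PySem.List.mem_pyRange_one.mp hj).1
      omega
    have hd : (avail.drop start).drop (j.toNat + 1) = avail.drop (((start : Int) + j).toNat + 1) := by
      rw [List.drop_drop]
      congr 1
      omega
    have hget : PySem.List.pyGetD (avail.drop start) j 0
        = PySem.List.pyGetD avail ((start : Int) + j) 0 := by
      have hc2 : j = ((j.toNat : Nat) : Int) := by omega
      have hc3 : (start : Int) + ((j.toNat : Nat) : Int) = (((start + j.toNat : Nat)) : Int) := by omega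
      rw [hc2, PySem.List.pyGetD_natCast, hc3, PySem.List.pyGetD_natCast]
      simp [List.getD, List.getElem?_drop]
    rw [hd, hget]


-- the allowed values {1..n} \ l, increasing (B's `avail`)
def pvAvail (n : Int) (l : List Int) : List Int :=
  (PySem.List.pyRange 1 (n + 1) 1).filter (fun x => !(decide (x ∈ l)))

lemma pvAvail_pairwise (n : Int) (l : List Int) : (pvAvail n l).Pairwise (· < ·) :=
  List.Pairwise.sublist List.filter_sublist (PySem.List.pairwise_lt_pyRange_one 1 (n + 1))

lemma mem_pvAvail {n : Int} {l : List Int} {x : Int} :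
    x ∈ pvAvail n l ↔ 1 ≤ x ∧ x < n + 1 ∧ x ∉ l := by
  simp [pvAvail, List.mem_filter, PySem.List.mem_pyRange_one, and_assoc]

lemma pvAvail_append (n : Int) (l : List Int) (v : Int) :
    pvAvail n (l ++ [v]) = (pvAvail n l).filter (fun x => !(decide (x = v))) := by
  unfold pvAvail
  rw [List.filter_filter]
  apply List.filter_congr
  intro x _
  by_cases h1 : x ∈ l <;> by_cases h2 : x = v <;> simp [h1, h2]

-- the shifted index loop of A ranges over exactly the allowed values
lemma pvRange_shift (n : Int) (l : List Int) :
    ((PySem.List.pyRange 0 n 1).filter (fun i => !(decide ((i + 1) ∈ l)))).map (fun i => i + 1)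
      = pvAvail n l := by
  unfold pvAvail
  rw [PySem.List.pyRange_one 0 n, PySem.List.pyRange_one 1 (n + 1)]
  simp only [List.filter_map, List.map_map]
  have he : (n - 0).toNat = (n + 1 - 1).toNat := by omega
  rw [he]
  have h1 : ∀ ks : List Nat,
      (ks.filter ((fun i => !(decide ((i + 1) ∈ l))) ∘ (fun k : Nat => (0 : Int) + k)))
        = ks.filter ((fun x => !(decide (x ∈ l))) ∘ (fun k : Nat => (1 : Int) + k)) := by
    intro ks
    apply List.filter_congr
    intro k _
    simp only [Function.comp]
    have : (0 : Int) + k + 1 = 1 + k := by omega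
    rw [this]
  rw [h1]
  apply List.map_congr_left
  intro k _
  simp only [Function.comp]
  omega

lemma mem_pvCombos {xs : List Int} {m : Nat} {a : List Int} :
    a ∈ pvCombos xs m ↔ a.Sublist xs ∧ a.length = m := by
  induction xs generalizing m a with
  | nil =>
    cases m with
    | zero =>
      simp only [pvCombos, List.mem_singleton, List.sublist_nil, List.length_eq_zero_iff]
      tauto
    | succ m =>
      simp only [pvCombos, List.not_mem_nil, false_iff, List.sublist_nil, not_and]
      rintro rfl; simp
  | cons x rest ih =>
    cases m with
    | zero =>
      simp only [pvCombos, List.mem_singleton]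
      constructor
      · rintro rfl; exact ⟨List.nil_sublist _, rfl⟩
      · rintro ⟨_, hl⟩; exact List.length_eq_zero_iff.mp hl
    | succ m =>
      simp only [pvCombos, List.mem_append, List.mem_map, ih, List.sublist_cons_iff]
      constructor
      · rintro (⟨t, ⟨hts, htl⟩, rfl⟩ | ⟨hs, hl⟩)
        · exact ⟨Or.inr ⟨t, rfl, hts⟩, by simp [htl]⟩
        · exact ⟨Or.inl hs, hl⟩
      · rintro ⟨hs | ⟨r, rfl, hr⟩, hl⟩
        · exact Or.inr ⟨hs, hl⟩
        · exact Or.inl ⟨r, ⟨hr, by simpa using hl⟩, rfl⟩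

lemma pvCombos_one (xs : List Int) : pvCombos xs 1 = xs.map (fun x => [x]) := by
  induction xs with
  | nil => rfl
  | cons x rest ih => simp [pvCombos, ih]

-- lex combinations restricted to a suffix of the ground set
lemma pvCombos_filter_all {p : Int → Bool} {A1 A2 : List Int} (m : Nat)
    (h1 : ∀ x ∈ A1, p x = false) (h2 : ∀ x ∈ A2, p x = true) :
    (pvCombos (A1 ++ A2) m).filter (fun j => j.all p) = pvCombos A2 m := by
  induction A1 generalizing m with
  | nil =>
    simp only [List.nil_append]
    apply List.filter_eq_self.mpr
    intro j hj
    have hs := (mem_pvCombos.mp hj).1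
    exact List.all_eq_true.mpr fun y hy => h2 y (hs.subset hy)
  | cons x A1 ih =>
    cases m with
    | zero => simp [pvCombos]
    | succ m =>
      have hx := h1 x (by simp)
      simp only [List.cons_append, pvCombos, List.filter_append]
      have hmap : ((pvCombos (A1 ++ A2) m).map (fun t => x :: t)).filter (fun j => j.all p) = [] := by
        rw [List.filter_map]
        have : ((pvCombos (A1 ++ A2) m).filter ((fun j => j.all p) ∘ (fun t => x :: t))) = [] := by
          apply List.filter_eq_nil_iff.mpr
          intro t _
          simp [hx]
        rw [this]; rfl
      rw [hmap, ih (m + 1) (fun y hy => h1 y (by simp [hy])), List.nil_append]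

-- unrolling pvCombos over a strictly increasing ground set
lemma pvCombos_flatMap {xs : List Int} (m : Nat) (hxs : xs.Pairwise (· < ·)) :
    pvCombos xs (m + 1)
      = xs.flatMap (fun x => (pvCombos (xs.filter (fun y => decide (x < y))) m).map (fun t => x :: t)) := by
  induction xs with
  | nil => rfl
  | cons z rest ih =>
    have hz : ∀ y ∈ rest, z < y := (List.pairwise_cons.mp hxs).1
    have hrest : rest.Pairwise (· < ·) := (List.pairwise_cons.mp hxs).2
    simp only [pvCombos, List.flatMap_cons]
    congr 1
    · congr 1
      rw [List.filter_cons_of_neg (by simp)]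
      rw [List.filter_eq_self.mpr (fun y hy => by simpa using hz y hy)]
    · rw [ih hrest]
      apply List.flatMap_congr
      intro y hy
      rw [List.filter_cons_of_neg (by simp [not_lt.mpr (le_of_lt (hz y hy))])]

lemma filter_ne_split {xs : List Int} {x : Int} (hxs : xs.Pairwise (· < ·)) :
    xs.filter (fun y => !(decide (y = x)))
      = xs.filter (fun y => decide (y < x)) ++ xs.filter (fun y => decide (x < y)) := by
  induction xs with
  | nil => rfl
  | cons z rest ih =>
    have hz : ∀ y ∈ rest, z < y := (List.pairwise_cons.mp hxs).1
    have hrest := (List.pairwise_cons.mp hxs).2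
    rcases lt_trichotomy z x with h | h | h
    · rw [List.filter_cons_of_pos (by simp; omega), List.filter_cons_of_pos (by simp [h]),
        List.filter_cons_of_neg (by simp; omega), List.cons_append, ih hrest]
    · subst h
      have e1 : rest.filter (fun y => decide (y < z)) = [] :=
        List.filter_eq_nil_iff.mpr (fun y hy => by have := hz y hy; simp; omega)
      have e2 : rest.filter (fun y => !(decide (y = z))) = rest :=
        List.filter_eq_self.mpr (fun y hy => by have := hz y hy; simp; omega)
      have e3 : rest.filter (fun y => decide (z < y)) = rest :=
        List.filter_eq_self.mpr (fun y hy => by have := hz y hy; simp; omega)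
      rw [List.filter_cons_of_neg (by simp), List.filter_cons_of_neg (by simp),
        List.filter_cons_of_neg (by simp), e1, e2, e3, List.nil_append]
    · have e1 : rest.filter (fun y => decide (y < x)) = [] :=
        List.filter_eq_nil_iff.mpr (fun y hy => by have := hz y hy; simp; omega)
      have e4 : (z :: rest).filter (fun y => decide (y < x)) = [] := by
        rw [List.filter_cons_of_neg (by simp; omega), e1]
      rw [List.filter_cons_of_pos (by simp; omega), ih hrest, e1, e4,
        List.filter_cons_of_pos (by simp [h])]
      simp

lemma filter_lt_succ_split {xs : List Int} {x : Int} (hxs : xs.Pairwise (· < ·)) (hx : x ∈ xs) :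
    xs.filter (fun y => decide (y < x + 1))
      = xs.filter (fun y => decide (y < x)) ++ [x] := by
  induction xs with
  | nil => cases hx
  | cons z rest ih =>
    have hz : ∀ y ∈ rest, z < y := (List.pairwise_cons.mp hxs).1
    have hrest := (List.pairwise_cons.mp hxs).2
    rcases List.mem_cons.mp hx with rfl | hx'
    · have e1 : rest.filter (fun y => decide (y < x + 1)) = [] :=
        List.filter_eq_nil_iff.mpr (fun y hy => by have := hz y hy; simp; omega)
      have e2 : rest.filter (fun y => decide (y < x)) = [] :=
        List.filter_eq_nil_iff.mpr (fun y hy => by have := hz y hy; simp; omega)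
      rw [List.filter_cons_of_pos (by simp), List.filter_cons_of_neg (by simp), e1, e2]
      rfl
    · have hzx : z < x := hz x hx'
      rw [List.filter_cons_of_pos (by simp; omega), List.filter_cons_of_pos (by simp [hzx]),
        ih hrest hx', List.cons_append]

lemma pvRajoute_go (x : Int) (LL : List (List Int)) :
    ∀ (lst : List (List Int)) (acc : List (List Int)),
      lst.foldl (fun L j =>
          let a := PySem.List.sorted (x :: j) (fun y => y) false
          if a ∈ LL then L else L ++ [a]) acc
        = acc ++ ((lst.filter (fun j => !(decide (PySem.List.sorted (x :: j) (fun y => y) false ∈ LL)))).map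
            (fun j => PySem.List.sorted (x :: j) (fun y => y) false)) := by
  intro lst
  induction lst with
  | nil => intro acc; simp
  | cons j lst ih =>
    intro acc
    by_cases h : PySem.List.sorted (x :: j) (fun y => y) false ∈ LL
    · rw [List.foldl_cons, List.filter_cons_of_neg (by simp [h])]
      simp only [if_pos h]
      exact ih acc
    · rw [List.foldl_cons, List.filter_cons_of_pos (by simp [h])]
      simp only [if_neg h]
      rw [ih (acc ++ [PySem.List.sorted (x :: j) (fun y => y) false])]
      simp

lemma pvRajoute_eq_filter_map (x : Int) (lst LL : List (List Int)) :
    pvRajoute x lst LL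
      = ((lst.filter (fun j => !(decide (PySem.List.sorted (x :: j) (fun y => y) false ∈ LL)))).map
          (fun j => PySem.List.sorted (x :: j) (fun y => y) false)) := by
  unfold pvRajoute
  simpa using pvRajoute_go x LL lst []

lemma sorted_cons_of_all_gt {x : Int} {j : List Int} (hj : j.Pairwise (· < ·))
    (hgt : ∀ y ∈ j, x < y) :
    PySem.List.sorted (x :: j) (fun y => y) false = x :: j :=
  PySem.List.sorted_eq_of_perm_of_pairwise_lt _ _ _ (List.Perm.refl _)
    (List.pairwise_cons.mpr ⟨hgt, hj⟩)

-- the part of the output A's outer loop has built after processing the values ≤ b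
def pvPartial (n : Int) (l : List Int) (m : Nat) (b : Int) : List (List Int) :=
  ((pvAvail n l).filter (fun x => decide (x < b + 1))).flatMap
    (fun x => (pvCombos ((pvAvail n l).filter (fun y => decide (x < y))) m).map (fun t => x :: t))

-- the core step: what rajoute(x, rec, L) appends when x is the next allowed value
lemma pvRajoute_step {n : Int} {l : List Int} {m : Nat} {x : Int}
    (hx : x ∈ pvAvail n l) :
    pvRajoute x (pvCombos (pvAvail n (l ++ [x])) m) (pvPartial n l m (x - 1))
      = (pvCombos ((pvAvail n l).filter (fun y => decide (x < y))) m).map (fun t => x :: t) := by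
  set A := pvAvail n l with hA
  have hAp : A.Pairwise (· < ·) := pvAvail_pairwise n l
  set A1 := A.filter (fun y => decide (y < x)) with hA1
  set A2 := A.filter (fun y => decide (x < y)) with hA2
  have havail' : pvAvail n (l ++ [x]) = A1 ++ A2 := by
    rw [pvAvail_append, ← hA, filter_ne_split hAp]
  have hF : pvPartial n l m (x - 1)
      = A1.flatMap (fun z => (pvCombos (A.filter (fun y => decide (z < y))) m).map (fun t => z :: t)) := by
    unfold pvPartial
    rw [← hA]
    congr 1
    rw [hA1]
    have hxx : x - 1 + 1 = x := by omega
    rw [hxx]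
  set F := pvPartial n l m (x - 1) with hFdef
  have hFhead : ∀ c ∈ F, ∃ z t, c = z :: t ∧ z < x := by
    intro c hc
    rw [hF] at hc
    obtain ⟨z, hz, hc⟩ := List.mem_flatMap.mp hc
    obtain ⟨t, _, rfl⟩ := List.mem_map.mp hc
    exact ⟨z, t, rfl, by simpa using (List.mem_filter.mp hz).2⟩
  have hA1A2p : (A1 ++ A2).Pairwise (· < ·) := by
    rw [← filter_ne_split hAp]
    exact List.Pairwise.sublist List.filter_sublist hAp
  have hjfacts : ∀ j ∈ pvCombos (A1 ++ A2) m,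
      j.Pairwise (· < ·) ∧ j.length = m ∧ (∀ y ∈ j, y ∈ A ∧ y ≠ x) := by
    intro j hj
    obtain ⟨hs, hl⟩ := mem_pvCombos.mp hj
    refine ⟨List.Pairwise.sublist hs hA1A2p, hl, ?_⟩
    intro y hy
    have : y ∈ A1 ++ A2 := hs.subset hy
    rcases List.mem_append.mp this with h | h
    · have := List.mem_filter.mp h
      exact ⟨this.1, by have := this.2; simp at this; omega⟩
    · have := List.mem_filter.mp h
      exact ⟨this.1, by have := this.2; simp at this; omega⟩
  have hdich : ∀ j ∈ pvCombos (A1 ++ A2) m,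
      (!(decide (PySem.List.sorted (x :: j) (fun y => y) false ∈ F)))
        = j.all (fun y => decide (x < y)) := by
    intro j hj
    obtain ⟨hjp, hjl, hjel⟩ := hjfacts j hj
    by_cases hall : ∀ y ∈ j, x < y
    · have hs := sorted_cons_of_all_gt hjp hall
      have hnotin : PySem.List.sorted (x :: j) (fun y => y) false ∉ F := by
        rw [hs]
        intro hmem
        obtain ⟨z, t, he, hzx⟩ := hFhead _ hmem
        rw [List.cons.injEq] at he
        omega
      have hallb : j.all (fun y => decide (x < y)) = true :=
        List.all_eq_true.mpr (fun y hy => by simpa using hall y hy)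
      simp [hnotin, hallb]
    · rw [not_forall] at hall
      obtain ⟨y, hall⟩ := hall
      rw [Classical.not_imp, not_lt] at hall
      obtain ⟨hy, hyx⟩ := hall
      have hylt : y < x := by
        have := (hjel y hy).2
        omega
      have hjx : j.filter (fun y => !(decide (y = x))) = j :=
        List.filter_eq_self.mpr (fun z hz => by simpa using (hjel z hz).2)
      have hsplit : j = j.filter (fun z => decide (z < x)) ++ j.filter (fun z => decide (x < z)) := by
        rw [← filter_ne_split hjp, hjx]
      set t := j.filter (fun z => decide (z < x)) with ht
      set d := j.filter (fun z => decide (x < z)) with hd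
      have hyt : y ∈ t := List.mem_filter.mpr ⟨hy, by simpa using hylt⟩
      obtain ⟨y0, t1, hteq⟩ : ∃ y0 t1, t = y0 :: t1 := by
        cases htc : t with
        | nil => rw [htc] at hyt; cases hyt
        | cons a b => exact ⟨a, b, rfl⟩
      have hapw : (t ++ x :: d).Pairwise (· < ·) := by
        apply List.pairwise_append.mpr
        refine ⟨List.Pairwise.sublist List.filter_sublist hjp, ?_, ?_⟩
        · apply List.pairwise_cons.mpr
          refine ⟨fun z hz => by simpa using (List.mem_filter.mp hz).2,
            List.Pairwise.sublist List.filter_sublist hjp⟩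
        · intro a ha b hb
          have hax : a < x := by simpa using (List.mem_filter.mp ha).2
          rcases List.mem_cons.mp hb with rfl | hb'
          · exact hax
          · have : x < b := by simpa using (List.mem_filter.mp hb').2
            omega
      have hperm : (t ++ x :: d).Perm (x :: j) := by
        calc (t ++ x :: d).Perm (x :: (t ++ d)) := List.perm_middle
          _ = x :: j := by rw [← hsplit]
      have hsorted : PySem.List.sorted (x :: j) (fun y => y) false = t ++ x :: d :=
        PySem.List.sorted_eq_of_perm_of_pairwise_lt _ _ _ hperm hapw
      have hmem : t ++ x :: d ∈ F := by
        rw [hF]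
        apply List.mem_flatMap.mpr
        refine ⟨y0, ?_, ?_⟩
        · apply List.mem_filter.mpr
          have hy0t : y0 ∈ t := by rw [hteq]; simp
          have hy0j : y0 ∈ j := List.mem_of_mem_filter hy0t
          refine ⟨(hjel y0 hy0j).1, ?_⟩
          have : y0 < x := by simpa using (List.mem_filter.mp hy0t).2
          simpa using this
        · apply List.mem_map.mpr
          refine ⟨t1 ++ x :: d, ?_, by rw [hteq]; simp⟩
          apply mem_pvCombos.mpr
          have htl : (t1 ++ x :: d).Pairwise (· < ·) := by
            have := hapw
            rw [hteq] at this
            exact (List.pairwise_cons.mp (by simpa using this)).2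
          have hgt : ∀ z ∈ t1 ++ x :: d, y0 < z := by
            have := hapw
            rw [hteq] at this
            exact (List.pairwise_cons.mp (by simpa using this)).1
          constructor
          · apply List.sublist_of_subperm_of_pairwise (r := (· < ·)) _ htl
              (List.Pairwise.sublist List.filter_sublist hAp)
            apply List.Nodup.subperm (htl.imp ne_of_lt)
            intro z hz
            apply List.mem_filter.mpr
            have hzA : z ∈ A := by
              rcases List.mem_append.mp hz with h | h
              · have hzt : z ∈ t := by rw [hteq]; exact List.mem_cons_of_mem _ h
                exact (hjel z (List.mem_of_mem_filter hzt)).1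
              · rcases List.mem_cons.mp h with rfl | h'
                · exact hx
                · exact (hjel z (List.mem_of_mem_filter h')).1
            exact ⟨hzA, by simpa using hgt z hz⟩
          · have : (t ++ x :: d).length = j.length + 1 := hperm.length_eq.trans (by simp)
            rw [hteq] at this
            simp at this ⊢
            omega
      have hin : PySem.List.sorted (x :: j) (fun y => y) false ∈ F := by rw [hsorted]; exact hmem
      have hnall : j.all (fun y => decide (x < y)) = false := by
        simp only [List.all_eq_false]
        exact ⟨y, hy, by simpa using hyx⟩
      simp [hin, hnall]
  rw [havail', pvRajoute_eq_filter_map, List.filter_congr hdich,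
    pvCombos_filter_all m
      (fun z hz => by have := (List.mem_filter.mp hz).2; simp at this ⊢; omega)
      (fun z hz => (List.mem_filter.mp hz).2)]
  apply List.map_congr_left
  intro j hj
  obtain ⟨hs, _⟩ := mem_pvCombos.mp hj
  have hjp : j.Pairwise (· < ·) :=
    List.Pairwise.sublist hs (List.Pairwise.sublist List.filter_sublist hAp)
  have hgt : ∀ y ∈ j, x < y := fun y hy => by
    simpa using (List.mem_filter.mp (hs.subset hy)).2
  exact sorted_cons_of_all_gt hjp hgt

-- the outer loop of A accumulates pvPartial
lemma pvLoop_inv (n : Int) (l : List Int) (m : Nat) :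
    ∀ b : Nat, (b : Int) ≤ n →
      (PySem.List.pyRange 0 (b : Int) 1).foldl
        (fun L i =>
          if (i + 1) ∈ l then L
          else L ++ pvRajoute (i + 1) (pvCombos (pvAvail n (l ++ [i + 1])) m) L) []
        = pvPartial n l m (b : Int) := by
  intro b
  induction b with
  | zero =>
    intro _
    rw [PySem.List.pyRange_one_eq_nil (by omega)]
    unfold pvPartial
    rw [List.filter_eq_nil_iff.mpr (fun y hy => by
      have := (mem_pvAvail.mp hy).1; simp; omega)]
    rfl
  | succ b ih =>
    intro hb
    have hb' : (b : Int) ≤ n := by push_cast at hb ⊢; omega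
    have hcast : ((b + 1 : Nat) : Int) = (b : Int) + 1 := by push_cast; rfl
    rw [hcast, PySem.List.pyRange_one_succ_right (by omega), List.foldl_append, ih hb']
    simp only [List.foldl_cons, List.foldl_nil]
    by_cases hmem : ((b : Int) + 1) ∈ l
    · rw [if_pos hmem]
      unfold pvPartial
      congr 1
      apply List.filter_congr
      intro y hy
      have hyA := mem_pvAvail.mp hy
      have hne : y ≠ (b : Int) + 1 := fun h => hyA.2.2 (h ▸ hmem)
      simp only [decide_eq_decide]
      omega
    · rw [if_neg hmem]
      have hx : ((b : Int) + 1) ∈ pvAvail n l := by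
        apply mem_pvAvail.mpr
        refine ⟨by omega, by push_cast at hb; omega, hmem⟩
      have hstep := pvRajoute_step (m := m) hx
      have hxm : (b : Int) + 1 - 1 = (b : Int) := by omega
      rw [hxm] at hstep
      rw [hstep]
      unfold pvPartial
      rw [filter_lt_succ_split (pvAvail_pairwise n l) hx, List.flatMap_append]
      simp
-- the k == 1 loop of A, as filter-and-map
lemma pvK1_go (l : List Int) :
    ∀ (rs : List Int) (acc : List (List Int)),
      rs.foldl (fun L i => if (i + 1) ∈ l then L else L ++ [[i + 1]]) acc
        = acc ++ (rs.filter (fun i => !(decide ((i + 1) ∈ l)))).map (fun i => [i + 1]) := by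
  intro rs
  induction rs with
  | nil => intro acc; simp
  | cons i rs ih =>
    intro acc
    by_cases h : (i + 1) ∈ l
    · rw [List.foldl_cons, List.filter_cons_of_neg (by simp [h])]
      simp only [if_pos h]
      exact ih acc
    · rw [List.foldl_cons, List.filter_cons_of_pos (by simp [h])]
      simp only [if_neg h]
      rw [ih (acc ++ [[i + 1]])]
      simp

-- one unfolding step of the equivalence, assuming it for the recursive calls
lemma pvMain_body (n k : Int) (l : List Int)
    (hrec : ∀ i : Int, i ∈ PySem.List.pyRange 0 n 1 → (i + 1) ∉ l →
      listekparmin (k - 1) n (l ++ [i + 1]) = listekparmin_alt (k - 1) n (l ++ [i + 1])) :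
    listekparmin k n l = listekparmin_alt k n l := by
  by_cases hk1 : k = 1
  · subst hk1
    rw [listekparmin, if_pos (by simp), pvK1_go, listekparmin_alt, if_neg (by omega), List.nil_append]
    have h1 : (1 : Int).toNat = 1 := rfl
    show _ = pvCombosF (pvAvail n l) ((0 : Nat) : Int) (1 : Int).toNat
    rw [pvCombosF_eq (pvAvail n l) (1 : Int).toNat 0, List.drop_zero]
    rw [h1, pvCombos_one, ← pvRange_shift n l, List.map_map]
    rfl
  · by_cases hk0 : k < 1
    · rw [listekparmin, if_neg (by simp [hk1])]
      have hstep : (PySem.List.pyRange 0 n 1).attach.foldl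
          (fun L x =>
            if h : (x.1 + 1) ∈ l then L
            else L ++ pvRajoute (x.1 + 1) (listekparmin (k - 1) n (l ++ [x.1 + 1])) L) []
          = (PySem.List.pyRange 0 n 1).attach.foldl (fun L _ => L) [] := by
        apply PySem.List.foldl_congr_mem
        intro acc x _
        by_cases h : (x.1 + 1) ∈ l
        · rw [dif_pos h]
        · rw [dif_neg h, hrec x.1 x.2 h, listekparmin_alt, if_pos (by omega)]
          simp [pvRajoute]
      rw [hstep, List.foldl_fixed, listekparmin_alt, if_pos hk0]
    · -- k ≥ 2
      have halt : ∀ i : Int,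
          listekparmin_alt (k - 1) n (l ++ [i + 1]) = pvCombos (pvAvail n (l ++ [i + 1])) (k - 1).toNat := by
        intro i
        rw [listekparmin_alt, if_neg (by omega)]
        show pvCombosF (pvAvail n (l ++ [i + 1])) ((0 : Nat) : Int) (k - 1).toNat = _
        rw [pvCombosF_eq, List.drop_zero]
      rw [listekparmin, if_neg (by simp [hk1])]
      have hstep : (PySem.List.pyRange 0 n 1).attach.foldl
          (fun L x =>
            if h : (x.1 + 1) ∈ l then L
            else L ++ pvRajoute (x.1 + 1) (listekparmin (k - 1) n (l ++ [x.1 + 1])) L) []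
          = (PySem.List.pyRange 0 n 1).foldl
              (fun L i =>
                if (i + 1) ∈ l then L
                else L ++ pvRajoute (i + 1) (pvCombos (pvAvail n (l ++ [i + 1])) (k - 1).toNat) L) [] := by
        rw [PySem.List.foldl_congr_mem (g := fun L (x : {x // x ∈ PySem.List.pyRange 0 n 1}) =>
          if (x.1 + 1) ∈ l then L
          else L ++ pvRajoute (x.1 + 1) (pvCombos (pvAvail n (l ++ [x.1 + 1])) (k - 1).toNat) L)]
        · exact List.foldl_attach (l := PySem.List.pyRange 0 n 1)
            (f := fun L i =>
              if (i + 1) ∈ l then L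
              else L ++ pvRajoute (i + 1) (pvCombos (pvAvail n (l ++ [i + 1])) (k - 1).toNat) L) ..
        · intro acc x _
          by_cases h : (x.1 + 1) ∈ l
          · rw [dif_pos h, if_pos h]
          · rw [dif_neg h, if_neg h, hrec x.1 x.2 h, halt x.1]
      rw [hstep, listekparmin_alt, if_neg (by omega)]
      by_cases hn : 0 ≤ n
      · have hb : ((n.toNat : Nat) : Int) = n := by omega
        have hinv := pvLoop_inv n l (k - 1).toNat n.toNat (by omega)
        rw [hb] at hinv
        rw [hinv]
        unfold pvPartial
        rw [List.filter_eq_self.mpr (fun y hy => by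
          have := (mem_pvAvail.mp hy).2.1; simpa using this)]
        have hkt : k.toNat = (k - 1).toNat + 1 := by omega
        show _ = pvCombosF (pvAvail n l) ((0 : Nat) : Int) k.toNat
        rw [pvCombosF_eq, List.drop_zero, hkt, pvCombos_flatMap (k - 1).toNat (pvAvail_pairwise n l)]
      · rw [PySem.List.pyRange_one_eq_nil (by omega : n ≤ 0)]
        have hav : pvAvail n l = [] := by
          unfold pvAvail
          rw [PySem.List.pyRange_one_eq_nil (by omega)]
          rfl
        obtain ⟨m, hm⟩ : ∃ m, k.toNat = m + 1 := ⟨k.toNat - 1, by omega⟩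
        show ([] : List (List Int)) = pvCombosF (pvAvail n l) ((0 : Nat) : Int) k.toNat
        rw [pvCombosF_eq, List.drop_zero, hav, hm]
        rfl

-- full equivalence, by strong induction on the number of still-allowed values
lemma listekparmin_eq_alt_aux (n : Int) :
    ∀ (c : Nat) (k : Int) (l : List Int), pvAvailCount n l ≤ c →
      listekparmin k n l = listekparmin_alt k n l := by
  intro c
  induction c with
  | zero =>
    intro k l hc
    apply pvMain_body
    intro i hi h
    exact absurd (pvAvailCount_dec n l i hi h) (by omega)
  | succ c ih =>
    intro k l hc
    apply pvMain_body
    intro i hi h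
    exact ih (k - 1) (l ++ [i + 1]) (by have := pvAvailCount_dec n l i hi h; omega)

theorem listekparmin_eq_alt (k n : Int) (l : List Int) :
    listekparmin k n l = listekparmin_alt k n l :=
  listekparmin_eq_alt_aux n (pvAvailCount n l) k l le_rfl

-- ===== VERDICT (by name: the statement is the Claim_ definition above) =====
theorem listekparmin_spec : Claim_equal_listekparmin := by
  intro k n l _
  unfold Spec_listekparmin
  exact listekparmin_eq_alt k n l
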